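-- pv_equiv track=rewrite | github.com/gitAdrianK/AdventOfCode | advent_of_code_2019/day_06/day_06.py | orbit_set
-- ===== SOURCE A (Python) =====
-- def orbit_set(orbit, orbits, set_=None):
--     if set_ is None:
--         set_ = set()
--     if orbit not in orbits:
--         return set_
--     else:
--         set_.add(orbit)
--         return orbit_set(orbits[orbit], orbits, set_)
-- ===== SOURCE B (Python) =====
-- def orbit_set(orbit, orbits, set_=None):
--     if set_ is None:
--         set_ = set()
--     current = orbit
--     for _ in range(len(orbits) + 1):
--         parent = orbits.get(current)
--         if parent is not None:
--             set_.add(current)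
--             current = parent
--     return set_
-- ===== Notes on version B (the rewrite author's own statement) =====
-- stated objective: alternative
-- what changed: Replaces the unbounded tail recursion with an iterative bounded for-loop over range(len(orbits)+1) that advances a (current, set) state with dict.get, needing no recursion and terminating even on cyclic parent maps (where A overflows the stack).
import Mathlib
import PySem

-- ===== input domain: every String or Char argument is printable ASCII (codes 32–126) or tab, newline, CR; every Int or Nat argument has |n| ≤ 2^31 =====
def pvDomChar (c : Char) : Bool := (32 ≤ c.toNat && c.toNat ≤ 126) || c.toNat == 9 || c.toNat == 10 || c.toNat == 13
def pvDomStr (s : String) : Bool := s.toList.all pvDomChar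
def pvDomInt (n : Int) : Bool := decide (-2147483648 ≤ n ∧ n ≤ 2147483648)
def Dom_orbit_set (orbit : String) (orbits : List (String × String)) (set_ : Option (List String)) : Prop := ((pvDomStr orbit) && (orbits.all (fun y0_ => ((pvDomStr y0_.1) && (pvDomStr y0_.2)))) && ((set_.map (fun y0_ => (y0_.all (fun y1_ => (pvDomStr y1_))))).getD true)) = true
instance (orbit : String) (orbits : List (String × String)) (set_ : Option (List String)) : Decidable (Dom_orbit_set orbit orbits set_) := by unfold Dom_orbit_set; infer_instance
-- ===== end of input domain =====

-- B replaces A's tail recursion by an iterative bounded for-loop over range(len(orbits)+1)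
-- advancing a (current, set) state with dict.get; return-value equivalence only
-- (both mutate the caller-supplied set_ in Python).


-- ===== PORT A =====
-- first-match lookup in the association list = Python dict membership/indexing
def pvLookup (orbits : List (String × String)) (k : String) : Option String :=
  (PySem.Dict.mk orbits).get? k

-- A's recursion, with fuel only to make it total in Lean; fuel = orbits.length + 1 is never
-- exhausted on inputs satisfying Pre_ (a terminating chain visits each distinct key at most once).
def orbitSetGoA (fuel : Nat) (orbit : String) (orbits : List (String × String)) (s : PySem.Set String) : List String :=
  match fuel with
  | 0 => s
  | fuel + 1 =>
    match pvLookup orbits orbit with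
    | none => s                                        -- if orbit not in orbits: return set_
    | some p => orbitSetGoA fuel p orbits (PySem.Set.add s orbit)  -- set_.add(orbit); recurse on orbits[orbit]

def orbit_set (orbit : String) (orbits : List (String × String)) (set_ : Option (List String)) : List String :=
  orbitSetGoA (orbits.length + 1) orbit orbits (PySem.Set.ofList (set_.getD []))

-- ===== PORT B =====
-- B's loop body: one iteration of "parent = orbits.get(current); if parent is not None: add/advance"
def orbitStepB (orbits : List (String × String)) (st : String × PySem.Set String) : String × PySem.Set String :=
  match (PySem.Dict.mk orbits).get? st.1 with
  | none => st
  | some parent => (parent, PySem.Set.add st.2 st.1)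

def orbit_set_alt (orbit : String) (orbits : List (String × String)) (set_ : Option (List String)) : List String :=
  ((List.range (orbits.length + 1)).foldl (fun st _ => orbitStepB orbits st)
    (orbit, PySem.Set.ofList (set_.getD []))).2

-- ===== PRECONDITION & SPEC =====
def pvParentStep (orbits : List (String × String)) (x : String) : String := (pvLookup orbits x).getD x

-- Pre_ excludes inputs whose parent chain from orbit is cyclic: there Python A blows the recursion
-- limit (RecursionError); on every terminating chain the walk leaves the key set within
-- orbits.length steps.
def Pre_orbit_set (orbit : String) (orbits : List (String × String)) (set_ : Option (List String)) : Prop :=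
  ∃ n ∈ List.range (orbits.length + 1), (pvLookup orbits ((pvParentStep orbits)^[n] orbit)).isNone
instance (orbit : String) (orbits : List (String × String)) (set_ : Option (List String)) : Decidable (Pre_orbit_set orbit orbits set_) := by unfold Pre_orbit_set; infer_instance

def pvWitness_orbit_set : String × (List (String × String)) × Option (List String) :=
  ("B", [("B", "COM")], some ["X"])

def Spec_orbit_set (orbit : String) (orbits : List (String × String)) (set_ : Option (List String)) (out : List String) : Prop := out = orbit_set_alt orbit orbits set_
instance (orbit : String) (orbits : List (String × String)) (set_ : Option (List String)) (out : List String) : Decidable (Spec_orbit_set orbit orbits set_ out) := by unfold Spec_orbit_set; infer_instance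

-- ===== CLAIM (what is proved, stated in full; the proofs are below) =====
def Claim_equal_orbit_set : Prop := ∀ (orbit : String) (orbits : List (String × String)) (set_ : Option (List String)), Dom_orbit_set orbit orbits set_ → Pre_orbit_set orbit orbits set_ → Spec_orbit_set orbit orbits set_ (orbit_set orbit orbits set_)

-- ===== LEMMAS AND PROOFS =====
-- once the chain has left the key set, A's recursion is done regardless of remaining fuel
theorem orbitSetGoA_none (fuel : Nat) (orbit : String) (orbits : List (String × String))
    (s : PySem.Set String) (h : pvLookup orbits orbit = none) :
    orbitSetGoA fuel orbit orbits s = s := by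
  cases fuel with
  | zero => rfl
  | succ fuel => simp [orbitSetGoA, h]

-- B's fold (the loop body ignores the loop index) computes A's recursion with fuel = list length
theorem foldB_eq_goA (l : List Nat) (orbit : String) (orbits : List (String × String))
    (s : PySem.Set String) :
    (l.foldl (fun st _ => orbitStepB orbits st) (orbit, s)).2 = orbitSetGoA l.length orbit orbits s := by
  induction l generalizing orbit s with
  | nil => rfl
  | cons a l ih =>
    simp only [List.foldl_cons, List.length_cons]
    cases h : pvLookup orbits orbit with
    | none =>
      rw [orbitSetGoA_none _ _ _ _ h]
      have hst : orbitStepB orbits (orbit, s) = (orbit, s) := by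
        simp [orbitStepB, pvLookup] at h ⊢; simp [h]
      rw [hst, ih orbit s, orbitSetGoA_none _ _ _ _ h]
    | some p =>
      have hst : orbitStepB orbits (orbit, s) = (p, PySem.Set.add s orbit) := by
        simp [orbitStepB, pvLookup] at h ⊢; simp [h]
      rw [hst, ih]
      simp [orbitSetGoA, h]

theorem orbit_set_witness_ok :
    Dom_orbit_set pvWitness_orbit_set.1 pvWitness_orbit_set.2.1 pvWitness_orbit_set.2.2 ∧
    Pre_orbit_set pvWitness_orbit_set.1 pvWitness_orbit_set.2.1 pvWitness_orbit_set.2.2 := by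
  decide

-- ===== VERDICT (by name: the statement is the Claim_ definition above) =====
theorem orbit_set_spec : Claim_equal_orbit_set := by
  intro orbit orbits set_ _ _
  unfold Spec_orbit_set orbit_set orbit_set_alt
  rw [foldB_eq_goA]
  simp
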